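-- pv_equiv track=rewrite | github.com/xilengs/note | python/leetCode/daily/2598.py | findSmallestInteger
-- ===== SOURCE A (Python) =====
-- def findSmallestInteger(nums, value):
--     n = len(nums)
--     list1 = [0] * value
--     for i in range(n):
--        list1[nums[i] % value] += 1
--     least = (0, 10 ** 9 + 1)
--     for i in range(len(list1)):
--         if list1[i] < least[1]:
--             least = (i, list1[i])
--     return least[1] * value + least[0]
-- ===== SOURCE B (Python) =====
-- def findSmallestInteger(nums, value):
--     rs = sorted(x % value for x in nums)
--     covered = []
--     j = 0
--     prev = None
--     for r in rs:
--         if r == prev: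
--             j += 1
--         else:
--             j = 0
--             prev = r
--         covered.append(r + j * value)
--     covered.sort()
--     m = 0
--     for v in covered:
--         if v == m:
--             m += 1
--         elif v > m:
--             break
--     return m
-- ===== Notes on version B (the rewrite author's own statement) =====
-- stated objective: alternative
-- what changed: B drops A's [0]*value counting array and its min-scan over all value residues entirely: it sorts the remainders, turns the i-th occurrence of remainder r within its run into the covered value r+i*value, sorts those, and returns their MEX by a single ordered sweep, so the work is O(n log n) independent of value.
-- outside the precondition, e.g. on findSmallestInteger([], -2): A returns -2000000002, B returns 0; on findSmallestInteger([5], -3): A raises IndexError, B returns 0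
import Mathlib
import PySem

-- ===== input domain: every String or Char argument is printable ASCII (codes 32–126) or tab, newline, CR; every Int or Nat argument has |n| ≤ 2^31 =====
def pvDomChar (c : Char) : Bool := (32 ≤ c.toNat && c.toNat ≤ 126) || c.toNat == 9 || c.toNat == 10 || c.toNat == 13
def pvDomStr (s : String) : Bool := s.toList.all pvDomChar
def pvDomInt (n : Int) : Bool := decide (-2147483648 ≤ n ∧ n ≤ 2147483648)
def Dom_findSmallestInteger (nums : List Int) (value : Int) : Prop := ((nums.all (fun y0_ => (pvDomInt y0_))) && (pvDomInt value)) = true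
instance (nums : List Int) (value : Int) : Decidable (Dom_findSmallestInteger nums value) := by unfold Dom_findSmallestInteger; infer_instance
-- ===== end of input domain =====

-- B abandons A's [0]*value counting array and its min-scan over all value residues: it sorts
-- the remainders, replaces the i-th element of each equal run by the covered value r+i*value,
-- sorts those, and returns their MEX by one ordered sweep.

-- ===== PORT A =====
-- [0]*value is ported as an Array (a Python list is an array). Under Pre_ (1 ≤ value) every
-- index used — nums[i] % value in the first loop, i in range(len(list1)) in the second — is
-- in [0, len(list1)), so list1[nums[i] % value] += 1 is ported exactly as setIfInBounds/getD
-- at that index, and list1[i] as getD i.toNat.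
def findSmallestInteger (nums : List Int) (value : Int) : Int :=
  let n := nums.length
  let list1 : Array Int := Array.replicate value.toNat 0
  let list1 := (PySem.List.pyRange 0 (n : Int) 1).foldl
    (fun a i =>
      a.setIfInBounds (PySem.Int.mod (PySem.List.pyGetD nums i 0) value).toNat
        (a.getD (PySem.Int.mod (PySem.List.pyGetD nums i 0) value).toNat 0 + 1)) list1
  let least : Int × Int := (0, 10 ^ 9 + 1)
  let least := (PySem.List.pyRange 0 (list1.size : Int) 1).foldl
    (fun least i =>
      if list1.getD i.toNat 0 < least.2 then (i, list1.getD i.toNat 0) else least)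
    least
  least.2 * value + least.1

-- ===== PORT B =====
-- 'for v in covered: if v == m: m += 1; elif v > m: break' — the for loop with a break,
-- ported as structural recursion on the remaining list.
def mexScan : List Int → Int → Int
  | [], m => m
  | v :: t, m => if v = m then mexScan t (m + 1) else if m < v then m else mexScan t m

-- state of B's first loop: (covered, j, prev); prev is None at the start (Option Int).
def findSmallestInteger_alt (nums : List Int) (value : Int) : Int :=
  let rs := PySem.List.sorted (nums.map (fun x => PySem.Int.mod x value)) (fun r => r)
  let st := rs.foldl
    (fun (st : List Int × Int × Option Int) r =>
      if st.2.2 = some r then (st.1 ++ [r + (st.2.1 + 1) * value], st.2.1 + 1, st.2.2)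
      else (st.1 ++ [r + 0 * value], 0, some r))
    (([] : List Int), (0 : Int), (none : Option Int))
  let covered := PySem.List.sorted st.1 (fun v => v)
  mexScan covered 0

-- ===== PRECONDITION & SPEC =====
-- Pre_ excludes value ≤ 0 (on nonempty nums A raises ZeroDivisionError/IndexError; on empty
-- nums A leaks its (0, 10**9+1) seed into the return while B returns the true MEX 0) and
-- lists longer than 10^9 (the problem's constraint; beyond it A's 10**9+1 seed could cap the
-- result below the true minimum count, so A's value there is an artefact of the seed).
def Pre_findSmallestInteger (nums : List Int) (value : Int) : Prop :=
  1 ≤ value ∧ (nums.length : Int) ≤ 10 ^ 9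
instance (nums : List Int) (value : Int) : Decidable (Pre_findSmallestInteger nums value) := by
  unfold Pre_findSmallestInteger; infer_instance

def pvWitness_findSmallestInteger : List Int × Int := ([3, 1, 2], 2)

def Spec_findSmallestInteger (nums : List Int) (value : Int) (out : Int) : Prop :=
  out = findSmallestInteger_alt nums value
instance (nums : List Int) (value : Int) (out : Int) : Decidable (Spec_findSmallestInteger nums value out) := by
  unfold Spec_findSmallestInteger; infer_instance

-- ===== CLAIM (what is proved, stated in full; the proofs are below) =====
def Claim_equal_findSmallestInteger : Prop :=
  ∀ (nums : List Int) (value : Int), Dom_findSmallestInteger nums value →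
    Pre_findSmallestInteger nums value →
    Spec_findSmallestInteger nums value (findSmallestInteger nums value)

-- ===== LEMMAS AND PROOFS =====

-- the candidate value of remainder r: (number of elements with x % value = r) * value + r
def fcand (nums : List Int) (value : Int) (r : Int) : Int :=
  (((nums.map (fun x => PySem.Int.mod x value)).count r : Int)) * value + r

-- ---------- A side (characterisation of A's counting array + min scan) ----------

-- Array.getD agrees with List.getD on toList
theorem arr_getD (a : Array Int) (i : Nat) (d : Int) : a.getD i d = a.toList.getD i d := by
  rw [List.getD_eq_getElem?_getD, Array.getElem?_toList, Array.getD_eq_getD_getElem?]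

-- the Array counting loop is the List counting loop on toList
theorem toList_countfold (R : List Int) (a : Array Int) :
    (R.foldl (fun a r => a.setIfInBounds r.toNat (a.getD r.toNat 0 + 1)) a).toList
      = R.foldl (fun l r => l.set r.toNat (l.getD r.toNat 0 + 1)) a.toList := by
  induction R generalizing a with
  | nil => rfl
  | cons r t ih =>
    simp only [List.foldl_cons]
    rw [ih, Array.toList_setIfInBounds, arr_getD]

-- A's first loop: the counting array holds, at index j, the count of remainder j
theorem countArray_spec (R : List Int) (l : List Int)
    (hR : ∀ r ∈ R, 0 ≤ r ∧ r < (l.length : Int)) :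
    (R.foldl (fun l r => l.set r.toNat (l.getD r.toNat 0 + 1)) l).length = l.length ∧
    ∀ j : Nat, j < l.length →
      (R.foldl (fun l r => l.set r.toNat (l.getD r.toNat 0 + 1)) l).getD j 0
        = l.getD j 0 + (R.count (j : Int) : Int) := by
  induction R generalizing l with
  | nil => simp
  | cons r t ih =>
    obtain ⟨hr0, hr1⟩ := hR r (List.mem_cons_self ..)
    simp only [List.foldl_cons]
    have hlen : (l.set r.toNat (l.getD r.toNat 0 + 1)).length = l.length :=
      List.length_set ..
    have hRt : ∀ x ∈ t, 0 ≤ x ∧ x < ((l.set r.toNat (l.getD r.toNat 0 + 1)).length : Int) := by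
      intro x hx; rw [hlen]; exact hR x (List.mem_cons_of_mem _ hx)
    obtain ⟨ih1, ih2⟩ := ih (l.set r.toNat (l.getD r.toNat 0 + 1)) hRt
    constructor
    · rw [ih1, hlen]
    · intro j hj
      rw [ih2 j (by rw [hlen]; exact hj)]
      have hcnt : ((r :: t).count (j : Int)) = t.count (j : Int) + if (j : Int) = r then 1 else 0 := by
        rw [List.count_cons]
        congr 1
        simp only [beq_iff_eq]
        by_cases h : (j : Int) = r
        · simp [h]
        · rw [if_neg h, if_neg (by omega)]
      rw [hcnt]
      by_cases he : (j : Int) = r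
      · have hjr : j = r.toNat := by omega
        subst hjr
        rw [List.getD_eq_getElem?_getD, List.getElem?_set_self (by omega)]
        simp only [Option.getD_some, if_pos he]
        push_cast
        omega
      · rw [List.getD_eq_getElem?_getD, List.getElem?_set_ne (by omega), ← List.getD_eq_getElem?_getD]
        rw [if_neg he]
        omega

-- A's second loop: first-minimum scan over indices 0..m-1 with seed (i0, c0)
theorem foldl_argmin (g : Int → Int) (m : Nat) (i0 c0 : Int) :
    (let res := (PySem.List.pyRange 0 (m : Int) 1).foldl
        (fun p i => if g i < p.2 then (i, g i) else p) (i0, c0)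
     (res = (i0, c0) ∧ ∀ j : Int, 0 ≤ j → j < (m : Int) → c0 ≤ g j) ∨
     (0 ≤ res.1 ∧ res.1 < (m : Int) ∧ res.2 = g res.1 ∧ res.2 < c0 ∧
       (∀ j : Int, 0 ≤ j → j < (m : Int) → res.2 ≤ g j) ∧
       (∀ j : Int, 0 ≤ j → j < res.1 → res.2 < g j))) := by
  induction m with
  | zero =>
    left
    constructor
    · rw [PySem.List.pyRange_one_eq_nil (by omega)]; rfl
    · intro j h0 h1; omega
  | succ m ih =>
    have hsplit : PySem.List.pyRange 0 ((m + 1 : Nat) : Int) 1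
        = PySem.List.pyRange 0 (m : Int) 1 ++ [(m : Int)] := by
      have := PySem.List.pyRange_one_succ_right (a := 0) (b := (m : Int)) (by omega)
      push_cast
      push_cast at this
      exact this
    rw [hsplit, List.foldl_append]
    simp only [List.foldl_cons, List.foldl_nil]
    set res := (PySem.List.pyRange 0 (m : Int) 1).foldl
        (fun p i => if g i < p.2 then (i, g i) else p) (i0, c0) with hres
    rcases ih with ⟨heq, hall⟩ | ⟨h0, h1, h2, h3, h4, h5⟩
    · rw [heq]
      by_cases hlt : g (m : Int) < c0
      · right
        rw [if_pos hlt]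
        refine ⟨by omega, by push_cast; omega, rfl, hlt, ?_, ?_⟩
        · intro j hj0 hj1
          rcases lt_or_ge j (m : Int) with h | h
          · exact le_of_lt (lt_of_lt_of_le hlt (hall j hj0 h))
          · have : j = (m : Int) := by push_cast at hj1; omega
            rw [this]
        · intro j hj0 hj1
          exact lt_of_lt_of_le hlt (hall j hj0 hj1)
      · left
        rw [if_neg hlt]
        refine ⟨rfl, ?_⟩
        intro j hj0 hj1
        rcases lt_or_ge j (m : Int) with h | h
        · exact hall j hj0 h
        · have : j = (m : Int) := by push_cast at hj1; omega
          rw [this]; omega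
    · by_cases hlt : g (m : Int) < res.2
      · right
        rw [if_pos hlt]
        refine ⟨by omega, by push_cast; omega, rfl, by omega, ?_, ?_⟩
        · intro j hj0 hj1
          rcases lt_or_ge j (m : Int) with h | h
          · exact le_of_lt (lt_of_lt_of_le hlt (h4 j hj0 h))
          · have : j = (m : Int) := by push_cast at hj1; omega
            rw [this]
        · intro j hj0 hj1
          exact lt_of_lt_of_le hlt (h4 j hj0 (by omega))
      · right
        rw [if_neg hlt]
        refine ⟨h0, by push_cast; omega, h2, h3, ?_, h5⟩
        intro j hj0 hj1
        rcases lt_or_ge j (m : Int) with h | h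
        · exact h4 j hj0 h
        · have : j = (m : Int) := by push_cast at hj1; omega
          rw [this]; omega

-- A returns a candidate and a lower bound of all candidates
theorem A_char (nums : List Int) (value : Int) (hv : 1 ≤ value)
    (hn : (nums.length : Int) ≤ 10 ^ 9) :
    ∃ r, 0 ≤ r ∧ r < value ∧ findSmallestInteger nums value = fcand nums value r ∧
      ∀ s, 0 ≤ s → s < value → findSmallestInteger nums value ≤ fcand nums value s := by
  have hv0 : (0 : Int) < value := by omega
  have hvt : ((value.toNat : Nat) : Int) = value := Int.toNat_of_nonneg (by omega)
  set R : List Int := nums.map (fun x => PySem.Int.mod x value) with hRdef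
  have hRmem : ∀ r ∈ R, 0 ≤ r ∧ r < value := by
    intro r hr
    rw [hRdef] at hr
    obtain ⟨x, _, hx⟩ := List.mem_map.mp hr
    rw [← hx]
    exact ⟨PySem.Int.mod_nonneg x hv0, PySem.Int.mod_lt x hv0⟩
  have hcnt_le : ∀ r : Int, (R.count r : Int) ≤ (nums.length : Int) := by
    intro r
    have h1 : R.count r ≤ R.length := List.count_le_length
    have h2 : R.length = nums.length := by rw [hRdef]; exact List.length_map ..
    omega
  simp only [findSmallestInteger]
  have hfold : (List.foldl
      (fun a i =>
        a.setIfInBounds (PySem.Int.mod (PySem.List.pyGetD nums i 0) value).toNat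
          (a.getD (PySem.Int.mod (PySem.List.pyGetD nums i 0) value).toNat 0 + 1))
      (Array.replicate value.toNat (0 : Int)) (PySem.List.pyRange 0 (nums.length : Int)))
      = R.foldl (fun a r => a.setIfInBounds r.toNat (a.getD r.toNat 0 + 1))
          (Array.replicate value.toNat (0 : Int)) := by
    rw [hRdef, List.foldl_map]
    exact PySem.List.foldl_pyRange_zero_pyGetD' nums 0
      (fun a x => a.setIfInBounds (PySem.Int.mod x value).toNat
        (a.getD (PySem.Int.mod x value).toNat 0 + 1))
      (Array.replicate value.toNat (0 : Int))
  rw [hfold]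
  set list1 : Array Int := R.foldl (fun a r => a.setIfInBounds r.toNat (a.getD r.toNat 0 + 1))
      (Array.replicate value.toNat 0) with hl1
  have hlist : list1.toList = R.foldl (fun l r => l.set r.toNat (l.getD r.toNat 0 + 1))
      (List.replicate value.toNat 0) := by
    rw [hl1, toList_countfold, Array.toList_replicate]
  obtain ⟨hlen, hget⟩ := countArray_spec R (List.replicate value.toNat 0)
    (by intro r hr; obtain ⟨a, b⟩ := hRmem r hr
        rw [List.length_replicate]; exact ⟨a, by omega⟩)
  rw [← hlist] at hlen hget
  rw [List.length_replicate] at hlen hget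
  have hsize : list1.size = value.toNat := by
    rw [Array.size_eq_length_toList, hlen]
  have hgetc : ∀ j : Int, 0 ≤ j → j < value →
      list1.getD j.toNat 0 = (R.count j : Int) := by
    intro j h0 h1
    rw [arr_getD]
    have hj : j.toNat < value.toNat := by omega
    have hg2 := hget j.toNat (by omega)
    rw [List.getD_replicate (0 : Int) hj] at hg2
    rw [hg2, Int.toNat_of_nonneg h0]
    omega
  rw [hsize, hvt]
  have harg := foldl_argmin (fun i => list1.getD i.toNat 0) value.toNat 0 (10 ^ 9 + 1)
  rw [hvt] at harg
  rcases harg with ⟨_, hall⟩ | ⟨h0, h1, h2, _, h4, h5⟩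
  · exfalso
    have := hall 0 (by omega) hv0
    rw [hgetc 0 (by omega) hv0] at this
    have := hcnt_le 0
    omega
  · set res := (PySem.List.pyRange 0 value 1).foldl
        (fun p i => if list1.getD i.toNat 0 < p.2 then (i, list1.getD i.toNat 0) else p)
        ((0 : Int), (10 : Int) ^ 9 + 1) with hres
    refine ⟨res.1, h0, h1, ?_, ?_⟩
    · unfold fcand
      rw [← hRdef, h2, hgetc res.1 h0 h1]
    · intro s hs0 hs1
      unfold fcand
      rw [← hRdef]
      have hle := h4 s hs0 hs1
      rw [hgetc s hs0 hs1] at hle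
      rw [h2, hgetc res.1 h0 h1] at *
      rcases eq_or_lt_of_le hle with he | hlt
      · have : ¬ s < res.1 := by
          intro hcon
          have := h5 s hs0 hcon
          rw [hgetc s hs0 (by omega)] at this
          omega
        have hs : res.1 ≤ s := by omega
        nlinarith
      · have hstep : (R.count res.1 : Int) + 1 ≤ (R.count s : Int) := by omega
        nlinarith

-- ---------- B side ----------

-- the list B's first loop appends, written as structural recursion: within a run of prev the
-- offset keeps counting up, a new value restarts the offset at 0
def produce (value : Int) : List Int → Int → Int → List Int
  | [], _, _ => []
  | r :: t, p, j =>
    if r = p then (r + (j + 1) * value) :: produce value t p (j + 1)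
    else (r + 0 * value) :: produce value t r 0

def produceTop (value : Int) : List Int → List Int
  | [] => []
  | r :: t => (r + 0 * value) :: produce value t r 0

-- B's foldl with state (covered, j, some p) appends exactly 'produce'
theorem fold_eq_produce (value : Int) (l : List Int) (cov : List Int) (j p : Int) :
    (l.foldl
      (fun (st : List Int × Int × Option Int) r =>
        if st.2.2 = some r then (st.1 ++ [r + (st.2.1 + 1) * value], st.2.1 + 1, st.2.2)
        else (st.1 ++ [r + 0 * value], 0, some r))
      (cov, j, some p)).1 = cov ++ produce value l p j := by
  induction l generalizing cov j p with
  | nil => simp [produce]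
  | cons r t ih =>
    simp only [List.foldl_cons, produce]
    by_cases h : r = p
    · subst h
      rw [if_pos rfl, if_pos rfl, ih]
      simp
    · rw [if_neg (by simp [Ne.symm h]), if_neg h, ih]
      simp

-- B's foldl from the initial (.., None) state appends exactly 'produceTop'
theorem fold_eq_produceTop (value : Int) (l : List Int) :
    (l.foldl
      (fun (st : List Int × Int × Option Int) r =>
        if st.2.2 = some r then (st.1 ++ [r + (st.2.1 + 1) * value], st.2.1 + 1, st.2.2)
        else (st.1 ++ [r + 0 * value], 0, some r))
      (([] : List Int), (0 : Int), (none : Option Int))).1 = produceTop value l := by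
  cases l with
  | nil => rfl
  | cons r t =>
    simp only [List.foldl_cons]
    rw [if_neg (by simp)]
    simpa [produceTop] using fold_eq_produce value t [r + 0 * value] 0 r

-- membership in 'produce' over a sorted tail: offsets j+1.. for the current run of p,
-- offsets 0..count-1 for every later value
theorem produce_mem (value : Int) (l : List Int) (p j : Int)
    (hl : l.Pairwise (· ≤ ·)) (hp : ∀ r ∈ l, p ≤ r) (m : Int) :
    m ∈ produce value l p j ↔
      (∃ k : Int, 0 ≤ k ∧ k < (l.count p : Int) ∧ m = p + (j + 1 + k) * value) ∨
      (∃ r ∈ l, r ≠ p ∧ ∃ k : Int, 0 ≤ k ∧ k < (l.count r : Int) ∧ m = r + k * value) := by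
  induction l generalizing p j with
  | nil => simp only [produce, List.count_nil]; simp; intros; omega
  | cons r t ih =>
    have hpair := (List.pairwise_cons.mp hl)
    have hrt : ∀ x ∈ t, r ≤ x := hpair.1
    have htl : t.Pairwise (· ≤ ·) := hpair.2
    by_cases h : r = p
    · subst h
      have hpr : produce value (r :: t) r j = (r + (j + 1) * value) :: produce value t r (j + 1) := by
        simp [produce]
      rw [hpr, List.mem_cons, ih r (j + 1) htl hrt]
      constructor
      · rintro (he | ⟨k, hk0, hk1, he⟩ | ⟨r', hr', hne, k, hk0, hk1, he⟩)
        · exact Or.inl ⟨0, le_refl 0, by rw [List.count_cons_self]; push_cast; omega, by rw [he]; ring⟩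
        · refine Or.inl ⟨k + 1, by omega, ?_, by rw [he]; ring⟩
          rw [List.count_cons_self]; push_cast; omega
        · refine Or.inr ⟨r', List.mem_cons_of_mem _ hr', hne, k, hk0, ?_, he⟩
          rw [List.count_cons_of_ne (Ne.symm hne)]; exact hk1
      · rintro (⟨k, hk0, hk1, he⟩ | ⟨r', hr', hne, k, hk0, hk1, he⟩)
        · rcases eq_or_lt_of_le hk0 with h0 | h0
          · exact Or.inl (by rw [he, ← h0]; try ring_nf)
          · refine Or.inr (Or.inl ⟨k - 1, by omega, ?_, by rw [he]; ring⟩)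
            rw [List.count_cons_self] at hk1; push_cast at hk1; omega
        · rcases List.mem_cons.mp hr' with h' | h'
          · exact absurd h' hne
          · refine Or.inr (Or.inr ⟨r', h', hne, k, hk0, ?_, he⟩)
            rw [List.count_cons_of_ne (Ne.symm hne)] at hk1; exact hk1
    · -- new run: r ≠ p, and p occurs nowhere in r :: t
      have hpr : p < r := lt_of_le_of_ne (hp r (List.mem_cons_self ..)) (Ne.symm h)
      have hpnot : (r :: t).count p = 0 := by
        rw [List.count_eq_zero]
        intro hc
        rcases List.mem_cons.mp hc with h' | h'
        · omega
        · have := hrt p h'; omega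
      have hprod : produce value (r :: t) p j = (r + 0 * value) :: produce value t r 0 := by
        simp [produce, h]
      rw [hprod, List.mem_cons, ih r 0 htl hrt]
      constructor
      · rintro (he | ⟨k, hk0, hk1, he⟩ | ⟨r', hr', hne, k, hk0, hk1, he⟩)
        · refine Or.inr ⟨r, List.mem_cons_self .., Ne.symm (by omega), 0, le_refl 0, ?_, he⟩
          rw [List.count_cons_self]; push_cast; positivity
        · refine Or.inr ⟨r, List.mem_cons_self .., Ne.symm (by omega), k + 1, by omega, ?_,
            by rw [he]; ring⟩
          rw [List.count_cons_self]; push_cast; omega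
        · have hr'r : r ≤ r' := hrt r' hr'
          refine Or.inr ⟨r', List.mem_cons_of_mem _ hr', by omega, k, hk0, ?_, he⟩
          rw [List.count_cons_of_ne (Ne.symm hne)]; exact hk1
      · rintro (⟨k, _, hk1, _⟩ | ⟨r', hr', hne, k, hk0, hk1, he⟩)
        · rw [hpnot] at hk1; norm_num at hk1; omega
        · rcases List.mem_cons.mp hr' with h' | h'
          · subst h'
            rw [List.count_cons_self] at hk1; push_cast at hk1
            rcases eq_or_lt_of_le hk0 with h0 | h0
            · exact Or.inl (by rw [he, ← h0]; try ring_nf)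
            · exact Or.inr (Or.inl ⟨k - 1, by omega, by omega, by rw [he]; ring⟩)
          · have hr'r : r ≤ r' := hrt r' h'
            by_cases hrr : r' = r
            · subst hrr
              rw [List.count_cons_self] at hk1; push_cast at hk1
              rcases eq_or_lt_of_le hk0 with h0 | h0
              · exact Or.inl (by rw [he, ← h0]; try ring_nf)
              · exact Or.inr (Or.inl ⟨k - 1, by omega, by omega, by rw [he]; ring⟩)
            · refine Or.inr (Or.inr ⟨r', h', hrr, k, hk0, ?_, he⟩)
              rw [List.count_cons_of_ne (Ne.symm hrr)] at hk1; exact hk1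

-- membership in 'produceTop' of a sorted list: each value r contributes r, r+value, …,
-- r + (count r - 1)*value
theorem produceTop_mem (value : Int) (S : List Int) (hS : S.Pairwise (· ≤ ·)) (m : Int) :
    m ∈ produceTop value S ↔
      ∃ r ∈ S, ∃ k : Int, 0 ≤ k ∧ k < (S.count r : Int) ∧ m = r + k * value := by
  cases S with
  | nil => simp [produceTop]
  | cons r t =>
    have hpair := (List.pairwise_cons.mp hS)
    have hpt : produceTop value (r :: t) = (r + 0 * value) :: produce value t r 0 := rfl
    rw [hpt, List.mem_cons, produce_mem value t r 0 hpair.2 hpair.1]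
    constructor
    · rintro (he | ⟨k, hk0, hk1, he⟩ | ⟨r', hr', hne, k, hk0, hk1, he⟩)
      · refine ⟨r, List.mem_cons_self .., 0, le_refl 0, ?_, he⟩
        rw [List.count_cons_self]; push_cast; positivity
      · refine ⟨r, List.mem_cons_self .., k + 1, by omega, ?_, by rw [he]; ring⟩
        rw [List.count_cons_self]; push_cast; omega
      · refine ⟨r', List.mem_cons_of_mem _ hr', k, hk0, ?_, he⟩
        rw [List.count_cons_of_ne (Ne.symm hne)]; exact hk1
    · rintro ⟨r', hr', k, hk0, hk1, he⟩
      by_cases hrr : r' = r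
      · subst hrr
        rw [List.count_cons_self] at hk1; push_cast at hk1
        rcases eq_or_lt_of_le hk0 with h0 | h0
        · exact Or.inl (by rw [he, ← h0]; try ring_nf)
        · exact Or.inr (Or.inl ⟨k - 1, by omega, by omega, by rw [he]; ring⟩)
      · have hr't : r' ∈ t := by
          rcases List.mem_cons.mp hr' with h' | h'
          · exact absurd h' hrr
          · exact h'
        refine Or.inr (Or.inr ⟨r', hr't, hrr, k, hk0, ?_, he⟩)
        rw [List.count_cons_of_ne (Ne.symm hrr)] at hk1; exact hk1

-- the run-indexed covered values, arithmetically: m is covered iff 0 ≤ m and fewer than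
-- count (m % value) many multiples fit below m
theorem mem_iff_arith (value : Int) (hv : 0 < value) (R : List Int)
    (hR : ∀ r ∈ R, 0 ≤ r ∧ r < value) (m : Int) :
    (∃ r ∈ R, ∃ k : Int, 0 ≤ k ∧ k < (R.count r : Int) ∧ m = r + k * value) ↔
      (0 ≤ m ∧ PySem.Int.floordiv m value < (R.count (PySem.Int.mod m value) : Int)) := by
  constructor
  · rintro ⟨r, hr, k, hk0, hk1, he⟩
    obtain ⟨hr0, hr1⟩ := hR r hr
    have hm0 : 0 ≤ m := by nlinarith
    have hfd : PySem.Int.floordiv m value = k := by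
      rw [PySem.Int.floordiv_eq_iff_of_pos hv]
      constructor
      · nlinarith
      · nlinarith
    have hmod : PySem.Int.mod m value = r := by
      have := PySem.Int.floordiv_mul_add_mod m value
      rw [hfd] at this
      nlinarith
    rw [hfd, hmod]
    exact ⟨hm0, hk1⟩
  · rintro ⟨hm0, hlt⟩
    refine ⟨PySem.Int.mod m value, ?_, PySem.Int.floordiv m value, ?_, hlt, ?_⟩
    · have : 0 < R.count (PySem.Int.mod m value) := by
        have h0 : (0 : Int) ≤ PySem.Int.floordiv m value := by
          rw [PySem.Int.le_floordiv_iff_mul_le hv]; nlinarith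
        omega
      exact List.count_pos_iff.mp this
    · rw [PySem.Int.le_floordiv_iff_mul_le hv]; nlinarith
    · have := PySem.Int.floordiv_mul_add_mod m value
      nlinarith [PySem.Int.floordiv_mul_add_mod m value]

-- B's final sweep: on a ≤-sorted list it returns the least m ≥ m0 absent from the list
theorem mexScan_spec (l : List Int) (hl : l.Pairwise (· ≤ ·)) (m0 : Int) :
    m0 ≤ mexScan l m0 ∧ mexScan l m0 ∉ l ∧
      ∀ m, m0 ≤ m → m < mexScan l m0 → m ∈ l := by
  induction l generalizing m0 with
  | nil => exact ⟨le_refl m0, by simp [mexScan], by intro m h1 h2; simp [mexScan] at h2; omega⟩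
  | cons v t ih =>
    have hpair := List.pairwise_cons.mp hl
    have hvt : ∀ x ∈ t, v ≤ x := hpair.1
    by_cases he : v = m0
    · obtain ⟨ih1, ih2, ih3⟩ := ih hpair.2 (m0 + 1)
      simp only [mexScan, if_pos he]
      refine ⟨by omega, ?_, ?_⟩
      · intro hc
        rcases List.mem_cons.mp hc with h | h
        · omega
        · exact ih2 h
      · intro m h1 h2
        rcases eq_or_lt_of_le h1 with h0 | h0
        · exact List.mem_cons.mpr (Or.inl (by omega))
        · exact List.mem_cons_of_mem _ (ih3 m (by omega) h2)
    · by_cases hgt : m0 < v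
      · simp only [mexScan, if_neg he, if_pos hgt]
        refine ⟨le_refl m0, ?_, by intro m h1 h2; omega⟩
        intro hc
        rcases List.mem_cons.mp hc with h | h
        · omega
        · have := hvt m0 h; omega
      · obtain ⟨ih1, ih2, ih3⟩ := ih hpair.2 m0
        simp only [mexScan, if_neg he, if_neg hgt]
        refine ⟨ih1, ?_, ?_⟩
        · intro hc
          rcases List.mem_cons.mp hc with h | h
          · omega
          · exact ih2 h
        · intro m h1 h2
          exact List.mem_cons_of_mem _ (ih3 m h1 h2)

-- B returns a candidate and a lower bound of all candidates
theorem B_char (nums : List Int) (value : Int) (hv : 1 ≤ value) :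
    ∃ r, 0 ≤ r ∧ r < value ∧ findSmallestInteger_alt nums value = fcand nums value r ∧
      ∀ s, 0 ≤ s → s < value → findSmallestInteger_alt nums value ≤ fcand nums value s := by
  have hv0 : (0 : Int) < value := by omega
  set R : List Int := nums.map (fun x => PySem.Int.mod x value) with hRdef
  have hRmem : ∀ r ∈ R, 0 ≤ r ∧ r < value := by
    intro r hr
    rw [hRdef] at hr
    obtain ⟨x, _, hx⟩ := List.mem_map.mp hr
    rw [← hx]
    exact ⟨PySem.Int.mod_nonneg x hv0, PySem.Int.mod_lt x hv0⟩
  simp only [findSmallestInteger_alt]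
  rw [← hRdef]
  set rs := PySem.List.sorted R (fun r => r) with hrs
  have hrs_perm : rs.Perm R := PySem.List.sorted_perm R (fun r => r) false
  have hrs_pair : rs.Pairwise (· ≤ ·) := PySem.List.sorted_pairwise R (fun r => r)
  rw [fold_eq_produceTop value rs]
  set cov0 := produceTop value rs with hcov0
  set covered := PySem.List.sorted cov0 (fun v => v) with hcov
  have hc_perm : covered.Perm cov0 := PySem.List.sorted_perm cov0 (fun v => v) false
  have hc_pair : covered.Pairwise (· ≤ ·) := PySem.List.sorted_pairwise cov0 (fun v => v)
  -- the arithmetic membership characterisation of 'covered'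
  have hmem : ∀ m : Int, m ∈ covered ↔
      (0 ≤ m ∧ PySem.Int.floordiv m value < (R.count (PySem.Int.mod m value) : Int)) := by
    intro m
    rw [hc_perm.mem_iff, hcov0, produceTop_mem value rs hrs_pair]
    rw [← mem_iff_arith value hv0 R hRmem m]
    constructor
    · rintro ⟨r, hr, k, hk⟩
      exact ⟨r, hrs_perm.mem_iff.mp hr, k, by rwa [← hrs_perm.count_eq]⟩
    · rintro ⟨r, hr, k, hk⟩
      exact ⟨r, hrs_perm.mem_iff.mpr hr, k, by rwa [hrs_perm.count_eq]⟩
  obtain ⟨hres0, hres1, hres2⟩ := mexScan_spec covered hc_pair 0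
  set res := mexScan covered 0 with hresdef
  -- no candidate fcand nums value s is covered, so res ≤ fcand nums value s for every s in [0, value)
  have hcand_le : ∀ s, 0 ≤ s → s < value → res ≤ fcand nums value s := by
    intro s hs0 hs1
    have hnotin : fcand nums value s ∉ covered := by
      rw [hmem]
      rintro ⟨_, hlt⟩
      have hfd : PySem.Int.floordiv (fcand nums value s) value = (R.count s : Int) := by
        rw [PySem.Int.floordiv_eq_iff_of_pos hv0]
        unfold fcand
        rw [← hRdef]
        constructor
        · omega
        · nlinarith
      have hmod : PySem.Int.mod (fcand nums value s) value = s := by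
        have := PySem.Int.floordiv_mul_add_mod (fcand nums value s) value
        rw [hfd] at this
        unfold fcand at this ⊢
        rw [← hRdef] at this ⊢
        nlinarith
      rw [hfd, hmod] at hlt
      omega
    by_contra hcon
    have hf0 : 0 ≤ fcand nums value s := by
      unfold fcand; rw [← hRdef]; positivity
    exact hnotin (hres2 (fcand nums value s) hf0 (by omega))
  -- res itself is a candidate: res = fcand (res % value)
  refine ⟨PySem.Int.mod res value, PySem.Int.mod_nonneg res hv0, PySem.Int.mod_lt res hv0, ?_, ?_⟩
  · have hge : fcand nums value (PySem.Int.mod res value) ≤ res := by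
      have hnot := hres1
      rw [hmem] at hnot
      push Not at hnot
      have hcnt := hnot hres0
      have := PySem.Int.floordiv_mul_add_mod res value
      unfold fcand
      rw [← hRdef]
      nlinarith
    have hle := hcand_le (PySem.Int.mod res value)
      (PySem.Int.mod_nonneg res hv0) (PySem.Int.mod_lt res hv0)
    omega
  · exact hcand_le

-- ===== VERDICT (by name: the statement is the Claim_ definition above) =====
theorem findSmallestInteger_spec : Claim_equal_findSmallestInteger := by
  intro nums value _hdom hpre
  obtain ⟨hv, hn⟩ := hpre
  obtain ⟨rA, hA0, hA1, hAeq, hAmin⟩ := A_char nums value hv hn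
  obtain ⟨rB, hB0, hB1, hBeq, hBmin⟩ := B_char nums value hv
  unfold Spec_findSmallestInteger
  have h1 : findSmallestInteger nums value ≤ findSmallestInteger_alt nums value := by
    rw [hBeq]; exact hAmin rB hB0 hB1
  have h2 : findSmallestInteger_alt nums value ≤ findSmallestInteger nums value := by
    rw [hAeq]; exact hBmin rA hA0 hA1
  omega
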